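-- pv_equiv track=rewrite | github.com/AntoineCanda/Python_and_algo | chaine_caracteres/t9.py | predictive_text
-- ===== SOURCE A (Python) =====
-- t9="22233344455566677778889999"
--
-- def lettre_to_chiffre(x):
--     # On verifie que c'est bien une lettre definie dans le codage
--     assert 'a' <= x and x <= 'z'
--     return t9[ord(x) - ord('a')]
--
-- def mot_to_code(mot):
--     # fonctionnel quand tu nous tiens...
--     return ''.join(map(lettre_to_chiffre,mot))
--
-- def predictive_text(dictionnaire):
--     # nombre de mot avec le prefixe p = freq[p]
--     freq = {}
--     for mot, poids in dictionnaire: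
--         prefixe = ""
--         for x in mot:
--             prefixe += x
--             if prefixe in freq:
--                 freq[prefixe] += poids
--             else:
--                 freq[prefixe] = poids
--     prop = {}
--     for prefixe in freq:
--         code = mot_to_code(prefixe)
--         if code not in prop or freq[prop[code]] < freq[prefixe]:
--             prop[code] = prefixe
--     return prop
-- ===== SOURCE B (Python) =====
-- t9 = "22233344455566677778889999"
--
-- def predictive_text(dictionnaire):
--     # Collect every non-empty prefix once, in first-seen order (word order, increasing length).
--     seen = set()
--     prefixes = []
--     for mot, _ in dictionnaire:
--         for i in range(1, len(mot) + 1):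
--             p = mot[:i]
--             if p not in seen:
--                 seen.add(p)
--                 prefixes.append(p)
--
--     # Weight of a prefix: total weight of the dictionary words that start with it
--     # (recomputed on demand instead of accumulated in a dict).
--     def weight(p):
--         return sum(w for m, w in dictionnaire if m.startswith(p))
--
--     prop = {}
--     for p in prefixes:
--         code = "".join(t9[ord(c) - ord('a')] for c in p)
--         if code not in prop or weight(prop[code]) < weight(p):
--             prop[code] = p
--     return prop
-- ===== Notes on version B (the rewrite author's own statement) =====
-- stated objective: alternative
-- what changed: B drops A's accumulated prefix-frequency dict entirely: it collects the distinct non-empty prefixes once in first-seen order (via slices and a set) and recomputes each prefix's weight on demand as the sum of weights of dictionary words starting with it, then picks the best prefix per T9 code with the same strict-< first-wins rule.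
import Mathlib
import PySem

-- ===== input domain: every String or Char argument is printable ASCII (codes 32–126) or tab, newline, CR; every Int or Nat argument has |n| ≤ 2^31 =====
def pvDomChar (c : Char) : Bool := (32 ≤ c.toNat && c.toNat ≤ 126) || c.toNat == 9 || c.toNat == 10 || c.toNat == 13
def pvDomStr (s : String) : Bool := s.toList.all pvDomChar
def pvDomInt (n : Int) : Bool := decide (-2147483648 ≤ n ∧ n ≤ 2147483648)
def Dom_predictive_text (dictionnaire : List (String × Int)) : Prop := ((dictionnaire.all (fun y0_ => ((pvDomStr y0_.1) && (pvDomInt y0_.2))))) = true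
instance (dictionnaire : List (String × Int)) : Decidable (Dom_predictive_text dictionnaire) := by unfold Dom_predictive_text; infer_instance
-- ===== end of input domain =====

-- B replaces A's accumulated prefix-frequency dict by a first-seen prefix list with
-- weights recomputed on demand as sums over the dictionary (alternative algorithm, not faster).


-- ===== PORT A =====
-- t9 = "22233344455566677778889999"  (as a char list; strings are handled on the List Char side)
def pvT9 : List Char :=
  ['2','2','2','3','3','3','4','4','4','5','5','5','6','6','6','7','7','7','7','8','8','8','9','9','9','9']

-- assert 'a' <= x <= 'z'; return t9[ord(x) - ord('a')].  none = AssertionError/IndexError.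
def lettre_to_chiffre (x : Char) : Option Char :=
  if 'a' ≤ x ∧ x ≤ 'z' then PySem.List.pyGet? pvT9 ((x.toNat : Int) - 97) else none

-- ''.join(map(lettre_to_chiffre, mot))
def mot_to_code (mot : List Char) : Option (List Char) :=
  mot.mapM lettre_to_chiffre

-- the inner 'for x in mot' loop of the freq-building pass: state = (prefixe, freq)
def pvFreqWord (freq : PySem.Dict (List Char) Int) (mot : List Char) (poids : Int) :
    PySem.Dict (List Char) Int :=
  (mot.foldl (fun s x =>
      let p := s.1 ++ [x]
      if s.2.contains p then (p, s.2.insert p (s.2.getD p 0 + poids))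
      else (p, s.2.insert p poids))
    (([] : List Char), freq)).2

-- body of 'for prefixe in freq: …'
def pvPropStep (freq : PySem.Dict (List Char) Int)
    (prop : PySem.Dict (List Char) (List Char)) (p : List Char) :
    PySem.Dict (List Char) (List Char) :=
  match mot_to_code p with
  | none => prop   -- AssertionError path: excluded by Pre_
  | some code =>
      if prop.contains code = false ∨ freq.getD (prop.getD code []) 0 < freq.getD p 0 then
        prop.insert code p
      else prop

def predictive_text (dictionnaire : List (String × Int)) : List (String × String) :=
  let freq := dictionnaire.foldl (fun f e => pvFreqWord f e.1.toList e.2) PySem.Dict.empty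
  let prop := freq.keys.foldl (pvPropStep freq) PySem.Dict.empty
  prop.items.map (fun q => (String.ofList q.1, String.ofList q.2))

-- ===== PORT B =====
-- ''.join(t9[ord(c) - ord('a')] for c in p)   (no assert; none = IndexError)
def pvCode (p : List Char) : Option (List Char) :=
  p.mapM (fun c => PySem.List.pyGet? pvT9 ((c.toNat : Int) - 97))

-- weight(p) = sum(w for m, w in dictionnaire if m.startswith(p))
def pvWeight (dictionnaire : List (String × Int)) (p : List Char) : Int :=
  dictionnaire.foldl
    (fun acc e => if PySem.Chars.startswith e.1.toList p then acc + e.2 else acc) 0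

-- the inner 'for i in range(1, len(mot)+1)' loop: state = (seen, prefixes)
def pvCollectWord (s : PySem.Set (List Char) × List (List Char)) (mot : List Char) :
    PySem.Set (List Char) × List (List Char) :=
  (PySem.List.pyRange 1 ((mot.length : Int) + 1) 1).foldl (fun s i =>
      let p := PySem.List.slice mot none (some i)
      if p ∈ s.1 then s else (s.1.add p, s.2 ++ [p])) s

-- body of 'for p in prefixes: …'
def pvBestStep (dictionnaire : List (String × Int))
    (prop : PySem.Dict (List Char) (List Char)) (p : List Char) :
    PySem.Dict (List Char) (List Char) :=
  match pvCode p with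
  | none => prop   -- IndexError path: excluded by Pre_
  | some code =>
      if prop.contains code = false ∨
          pvWeight dictionnaire (prop.getD code []) < pvWeight dictionnaire p then
        prop.insert code p
      else prop

def predictive_text_alt (dictionnaire : List (String × Int)) : List (String × String) :=
  let prefixes :=
    (dictionnaire.foldl (fun s e => pvCollectWord s e.1.toList)
      (([] : PySem.Set (List Char)), ([] : List (List Char)))).2
  let prop := prefixes.foldl (pvBestStep dictionnaire) PySem.Dict.empty
  prop.items.map (fun q => (String.ofList q.1, String.ofList q.2))

-- ===== PRECONDITION & SPEC =====
-- Pre_ excludes dictionaries containing a word with a character outside 'a'..'z':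
-- on every such input A raises AssertionError in lettre_to_chiffre.
def Pre_predictive_text (dictionnaire : List (String × Int)) : Prop :=
  (dictionnaire.all (fun e => e.1.toList.all (fun c => 97 ≤ c.toNat && c.toNat ≤ 122))) = true
instance (dictionnaire : List (String × Int)) : Decidable (Pre_predictive_text dictionnaire) := by
  unfold Pre_predictive_text; infer_instance

def pvWitness_predictive_text : (List (String × Int)) := [("abc", 2), ("ab", 1), ("b", 3)]

def Spec_predictive_text (dictionnaire : List (String × Int)) (out : List (String × String)) : Prop := out = predictive_text_alt dictionnaire
instance (dictionnaire : List (String × Int)) (out : List (String × String)) : Decidable (Spec_predictive_text dictionnaire out) := by unfold Spec_predictive_text; infer_instance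

-- ===== CLAIM (what is proved, stated in full; the proofs are below) =====
def Claim_equal_predictive_text : Prop := ∀ (dictionnaire : List (String × Int)), Dom_predictive_text dictionnaire → Pre_predictive_text dictionnaire → Spec_predictive_text dictionnaire (predictive_text dictionnaire)

-- ===== LEMMAS AND PROOFS =====

-- the list of non-empty prefixes of a word, shortest first
def prefList (mot : List Char) : List (List Char) :=
  (List.range mot.length).map (fun i => mot.take (i + 1))

-- append the members of l not already present, in order
def addNew (acc l : List (List Char)) : List (List Char) :=
  l.foldl (fun a p => if p ∈ a then a else a ++ [p]) acc

-- all distinct non-empty prefixes of words of d, in first-seen order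
def pvPref (d : List (String × Int)) : List (List Char) :=
  d.foldl (fun acc e => addNew acc (prefList e.1.toList)) []

-- ---- prefList facts ----
theorem mem_prefList {p m : List Char} : p ∈ prefList m ↔ p ≠ [] ∧ p <+: m := by
  unfold prefList
  simp only [List.mem_map, List.mem_range]
  constructor
  · rintro ⟨i, hi, rfl⟩
    refine ⟨?_, List.take_prefix _ _⟩
    have hlen : (m.take (i+1)).length = i + 1 := by
      rw [List.length_take]; omega
    intro h; rw [h] at hlen; simp at hlen
  · rintro ⟨hne, hpre⟩
    have hle : p.length ≤ m.length := hpre.length_le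
    have hpos : 0 < p.length := List.length_pos_iff.mpr hne
    refine ⟨p.length - 1, by omega, ?_⟩
    have h1 : p.length - 1 + 1 = p.length := by omega
    rw [h1]
    exact (List.prefix_iff_eq_take.mp hpre).symm

theorem nodup_prefList (m : List Char) : (prefList m).Nodup := by
  unfold prefList
  refine List.Nodup.map_on ?_ (List.nodup_range)
  intro i hi j hj hij
  have h1 : (m.take (i+1)).length = i + 1 := by
    rw [List.length_take]; simp at hi; omega
  have h2 : (m.take (j+1)).length = j + 1 := by
    rw [List.length_take]; simp at hj; omega
  rw [hij] at h1; rw [h2] at h1; omega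

-- ---- addNew facts ----
theorem addNew_nil (acc : List (List Char)) : addNew acc [] = acc := rfl

theorem addNew_cons (acc : List (List Char)) (p : List Char) (l : List (List Char)) :
    addNew acc (p :: l) = addNew (if p ∈ acc then acc else acc ++ [p]) l := by
  unfold addNew; simp

theorem mem_addNew {q : List Char} : ∀ (l acc : List (List Char)),
    q ∈ addNew acc l ↔ q ∈ acc ∨ q ∈ l := by
  intro l
  induction l with
  | nil => intro acc; simp [addNew_nil]
  | cons p t ih =>
    intro acc
    rw [addNew_cons, ih]
    by_cases hp : p ∈ acc
    · rw [if_pos hp]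
      constructor
      · rintro (h | h)
        · exact Or.inl h
        · exact Or.inr (by simp [h])
      · rintro (h | h)
        · exact Or.inl h
        · rcases List.mem_cons.mp h with h | h
          · exact Or.inl (h ▸ hp)
          · exact Or.inr h
    · rw [if_neg hp]
      simp only [List.mem_append, List.mem_cons]
      tauto

theorem nodup_addNew : ∀ (l acc : List (List Char)), acc.Nodup → (addNew acc l).Nodup := by
  intro l
  induction l with
  | nil => intro acc h; exact h
  | cons p t ih =>
    intro acc h
    rw [addNew_cons]
    by_cases hp : p ∈ acc
    · rw [if_pos hp]; exact ih acc h
    · rw [if_neg hp]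
      refine ih _ ?_
      rw [List.nodup_append]
      exact ⟨h, by simp, by intro a ha b hb; rw [List.mem_singleton] at hb; subst hb; exact fun hh => hp (hh ▸ ha)⟩

-- ---- the freq-update as a single insert ----
def dUpd (f : PySem.Dict (List Char) Int) (p : List Char) (w : Int) :
    PySem.Dict (List Char) Int :=
  if f.contains p then f.insert p (f.getD p 0 + w) else f.insert p w

theorem dUpd_eq (f : PySem.Dict (List Char) Int) (p : List Char) (w : Int) :
    dUpd f p w = f.insert p (f.getD p 0 + w) := by
  unfold dUpd
  split_ifs with h
  · rfl
  · rw [PySem.Dict.getD_of_not_contains _ _ (by simpa using h), zero_add]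

-- ---- A's inner word loop as a fold over the prefix list ----
theorem freqWord_fold (w : Int) : ∀ (mot c : List Char) (f : PySem.Dict (List Char) Int),
    (mot.foldl (fun s x => (s.1 ++ [x], dUpd s.2 (s.1 ++ [x]) w)) (c, f)).2
    = ((List.range mot.length).map (fun i => c ++ mot.take (i + 1))).foldl
        (fun f p => dUpd f p w) f := by
  intro mot
  induction mot with
  | nil => intro c f; simp
  | cons x xs ih =>
    intro c f
    simp only [List.foldl_cons, List.length_cons, List.range_succ_eq_map, List.map_cons,
      List.map_map, List.take_succ_cons, List.take_zero]
    rw [ih (c ++ [x]) (dUpd f (c ++ [x]) w)]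
    congr 1
    apply List.map_congr_left
    intro i _
    simp [Function.comp]

-- ---- dict lookups on a literal keyed map ----
theorem keys_mkmap (P : List (List Char)) (W : List Char → Int) :
    (PySem.Dict.mk (P.map (fun q => (q, W q)))).keys = P := by
  rw [PySem.Dict.keys_mk, List.map_map]
  exact List.map_id'' (congrFun rfl) P

theorem getD_mkmap {P : List (List Char)} (hP : P.Nodup) (W : List Char → Int)
    {p : List Char} (hp : p ∈ P) (d0 : Int) :
    (PySem.Dict.mk (P.map (fun q => (q, W q)))).getD p d0 = W p := by
  have hmem : (p, W p) ∈ P.map (fun q => (q, W q)) := List.mem_map_of_mem hp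
  exact PySem.Dict.getD_of_mem_items _ hmem (by rw [keys_mkmap]; exact hP) d0

theorem contains_mkmap (P : List (List Char)) (W : List Char → Int) (p : List Char) :
    (PySem.Dict.mk (P.map (fun q => (q, W q)))).contains p = decide (p ∈ P) := by
  by_cases hp : p ∈ P
  · have hc : (PySem.Dict.mk (P.map (fun q => (q, W q)))).contains p = true :=
      (PySem.Dict.contains_iff_mem_keys _ _).mpr (by rw [keys_mkmap]; exact hp)
    rw [hc]; simp [hp]
  · simp only [hp, decide_false]
    by_contra h
    exact hp (by simpa using h)

-- ---- running a nodup insert sequence over a literal keyed map ----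
theorem run_insert (w : Int) : ∀ (l : List (List Char)), l.Nodup →
    ∀ (P : List (List Char)), P.Nodup → ∀ (W : List Char → Int),
    l.foldl (fun f p => f.insert p (f.getD p 0 + w))
        (PySem.Dict.mk (P.map (fun q => (q, W q))))
    = PySem.Dict.mk ((addNew P l).map
        (fun q => (q, (if q ∈ P then W q else 0) + (if q ∈ l then w else 0)))) := by
  intro l
  induction l with
  | nil =>
    intro _ P hP W
    simp only [List.foldl_nil, addNew_nil, List.not_mem_nil, if_false, add_zero]
    congr 1
    apply List.map_congr_left
    intro q hq; simp [hq]
  | cons p t ih =>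
    intro hnd P hP W
    have hpt : p ∉ t := (List.nodup_cons.mp hnd).1
    have hnt : t.Nodup := (List.nodup_cons.mp hnd).2
    rw [List.foldl_cons]
    by_cases hp : p ∈ P
    · have hcon : (PySem.Dict.mk (P.map (fun q => (q, W q)))).contains p = true := by
        rw [contains_mkmap]; simp [hp]
      rw [getD_mkmap hP W hp]
      have hins : (PySem.Dict.mk (P.map (fun q => (q, W q)))).insert p (W p + w)
          = PySem.Dict.mk (P.map (fun q => (q, if q = p then W p + w else W q))) := by
        apply PySem.Dict.ext
        rw [PySem.Dict.items_insert_of_contains _ _ hcon]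
        simp only [List.map_map]
        apply List.map_congr_left
        intro q _
        by_cases hqp : q = p
        · subst hqp; simp
        · simp [Function.comp, hqp]
      rw [hins, ih hnt P hP _]
      rw [addNew_cons, if_pos hp]
      congr 1
      apply List.map_congr_left
      intro q hq
      by_cases hqp : q = p
      · subst hqp
        simp [hp, hpt]
      · have hmem : (q ∈ p :: t) = (q ∈ t) := by simp [List.mem_cons, hqp]
        simp only [hqp, if_false, hmem]
    · have hcon : (PySem.Dict.mk (P.map (fun q => (q, W q)))).contains p = false := by
        rw [contains_mkmap]; simp [hp]
      rw [PySem.Dict.getD_of_not_contains _ _ hcon, zero_add]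
      have hins : (PySem.Dict.mk (P.map (fun q => (q, W q)))).insert p w
          = PySem.Dict.mk ((P ++ [p]).map (fun q => (q, if q = p then w else W q))) := by
        apply PySem.Dict.ext
        rw [PySem.Dict.items_insert_of_not_contains _ _ hcon]
        rw [List.map_append]
        congr 1
        · apply List.map_congr_left
          intro q hq
          have hqp : q ≠ p := fun h => hp (h ▸ hq)
          simp [hqp]
        · simp
      have hPp : (P ++ [p]).Nodup := by
        rw [List.nodup_append]
        exact ⟨hP, by simp, by intro a ha b hb; rw [List.mem_singleton] at hb; subst hb; exact fun hh => hp (hh ▸ ha)⟩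
      rw [hins, ih hnt (P ++ [p]) hPp _]
      rw [addNew_cons, if_neg hp]
      congr 1
      apply List.map_congr_left
      intro q hq
      by_cases hqp : q = p
      · subst hqp
        simp [hp, hpt]
      · have h1 : (q ∈ P ++ [p]) = (q ∈ P) := by simp [List.mem_append, hqp]
        have h2 : (q ∈ p :: t) = (q ∈ t) := by simp [List.mem_cons, hqp]
        simp only [hqp, if_false, h1, h2]

-- ---- weights ----
theorem weight_concat (d : List (String × Int)) (e : String × Int) (p : List Char) :
    pvWeight (d ++ [e]) p
    = pvWeight d p + (if PySem.Chars.startswith e.1.toList p then e.2 else 0) := by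
  unfold pvWeight
  rw [List.foldl_append]
  simp only [List.foldl_cons, List.foldl_nil]
  split_ifs <;> simp

theorem weight_zero : ∀ (d : List (String × Int)) (p : List Char),
    (∀ e ∈ d, ¬ p <+: e.1.toList) → pvWeight d p = 0 := by
  intro d
  induction d with
  | nil => intro p _; rfl
  | cons e t ih =>
    intro p h
    have hsw : PySem.Chars.startswith e.1.toList p = false := by
      simp only [PySem.Chars.startswith]
      rw [Bool.eq_false_iff]
      intro hc
      exact h e (by simp) (List.isPrefixOf_iff_prefix.mp hc)
    have ht := ih p (fun e' he' => h e' (by simp [he']))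
    unfold pvWeight at ht ⊢
    rw [List.foldl_cons, hsw]
    simpa using ht

-- ---- pvPref facts ----
theorem pvPref_concat (d : List (String × Int)) (e : String × Int) :
    pvPref (d ++ [e]) = addNew (pvPref d) (prefList e.1.toList) := by
  unfold pvPref
  rw [List.foldl_append]
  rfl

theorem mem_pvPref {q : List Char} : ∀ (d : List (String × Int)),
    q ∈ pvPref d ↔ ∃ e ∈ d, q ≠ [] ∧ q <+: e.1.toList := by
  intro d
  induction d using List.reverseRecOn with
  | nil => simp [pvPref]
  | append_singleton d e ih =>
    rw [pvPref_concat, mem_addNew, ih, mem_prefList]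
    constructor
    · rintro (⟨e', he', h⟩ | h)
      · exact ⟨e', by simp [he'], h⟩
      · exact ⟨e, by simp, h⟩
    · rintro ⟨e', he', h⟩
      rcases List.mem_append.mp he' with h' | h'
      · exact Or.inl ⟨e', h', h⟩
      · simp only [List.mem_singleton] at h'
        subst h'
        exact Or.inr h

theorem nodup_pvPref (d : List (String × Int)) : (pvPref d).Nodup := by
  induction d using List.reverseRecOn with
  | nil => simp [pvPref]
  | append_singleton d e ih =>
    rw [pvPref_concat]
    exact nodup_addNew _ _ ih

theorem ne_nil_of_mem_pvPref {q : List Char} {d : List (String × Int)}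
    (h : q ∈ pvPref d) : q ≠ [] := by
  rcases (mem_pvPref d).mp h with ⟨e, _, hne, _⟩
  exact hne

-- ---- freq characterization ----
theorem freq_spec (d : List (String × Int)) :
    d.foldl (fun f e => pvFreqWord f e.1.toList e.2) PySem.Dict.empty
    = PySem.Dict.mk ((pvPref d).map (fun q => (q, pvWeight d q))) := by
  induction d using List.reverseRecOn with
  | nil => rfl
  | append_singleton d e ih =>
    rw [List.foldl_append, List.foldl_cons, List.foldl_nil, ih]
    unfold pvFreqWord
    have hbody : (fun (s : List Char × PySem.Dict (List Char) Int) x =>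
        let p := s.1 ++ [x]
        if s.2.contains p then (p, s.2.insert p (s.2.getD p 0 + e.2))
        else (p, s.2.insert p e.2))
        = fun s x => (s.1 ++ [x], dUpd s.2 (s.1 ++ [x]) e.2) := by
      funext s x
      simp only [dUpd]
      split_ifs <;> rfl
    rw [hbody, freqWord_fold]
    have hfn : (fun (f : PySem.Dict (List Char) Int) p => dUpd f p e.2)
        = fun f p => f.insert p (f.getD p 0 + e.2) := by
      funext f p; exact dUpd_eq f p e.2
    rw [hfn]
    have hl : ((List.range e.1.toList.length).map (fun i => [] ++ e.1.toList.take (i + 1)))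
        = prefList e.1.toList := by
      unfold prefList; simp
    rw [hl]
    rw [run_insert e.2 _ (nodup_prefList _) _ (nodup_pvPref d)]
    rw [pvPref_concat]
    congr 1
    apply List.map_congr_left
    intro q hq
    have hqne : q ≠ [] := by
      rcases (mem_addNew _ _).mp hq with h | h
      · exact ne_nil_of_mem_pvPref h
      · exact (mem_prefList.mp h).1
    have hiff : q ∈ prefList e.1.toList ↔ PySem.Chars.startswith e.1.toList q = true := by
      rw [mem_prefList]
      simp only [PySem.Chars.startswith, List.isPrefixOf_iff_prefix]
      tauto
    rw [weight_concat]
    by_cases hqd : q ∈ pvPref d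
    · simp only [hqd, if_true, Prod.mk.injEq, true_and]
      congr 1
      by_cases hqp : q ∈ prefList e.1.toList
      · rw [if_pos hqp, if_pos (hiff.mp hqp)]
      · rw [if_neg hqp, if_neg (fun h => hqp (hiff.mpr h))]
    · have hqp : q ∈ prefList e.1.toList := by
        rcases (mem_addNew _ _).mp hq with h | h
        · exact absurd h hqd
        · exact h
      have hw0 : pvWeight d q = 0 := by
        apply weight_zero
        intro e' he' hpre
        exact hqd ((mem_pvPref d).mpr ⟨e', he', hqne, hpre⟩)
      rw [if_neg hqd, if_pos hqp, if_pos (hiff.mp hqp), hw0]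

-- ---- B's prefix collection ----
theorem collectWord_eq (s : PySem.Set (List Char) × List (List Char)) (mot : List Char) :
    pvCollectWord s mot
    = (prefList mot).foldl
        (fun s p => if p ∈ s.1 then s else (s.1.add p, s.2 ++ [p])) s := by
  unfold pvCollectWord
  rw [PySem.List.pyRange_one]
  have hn : (((mot.length : Int) + 1) - 1).toNat = mot.length := by omega
  rw [hn, List.foldl_map]
  unfold prefList
  rw [List.foldl_map]
  congr 1
  funext s k
  have hsl : PySem.List.slice mot none (some ((1 : Int) + (k : Int))) = mot.take (k + 1) := by
    have hc : ((1 : Int) + (k : Int)) = (((k + 1 : Nat)) : Int) := by push_cast; ring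
    rw [hc, PySem.List.slice_to_natCast]
  simp only [hsl]

theorem collect_run : ∀ (l : List (List Char)) (S : PySem.Set (List Char)) (L : List (List Char)),
    (∀ q, q ∈ S ↔ q ∈ L) →
    ((l.foldl (fun s p => if p ∈ s.1 then s else (s.1.add p, s.2 ++ [p])) (S, L)).2 = addNew L l
    ∧ ∀ q, q ∈ (l.foldl (fun s p => if p ∈ s.1 then s else (s.1.add p, s.2 ++ [p])) (S, L)).1
        ↔ q ∈ (l.foldl (fun s p => if p ∈ s.1 then s else (s.1.add p, s.2 ++ [p])) (S, L)).2) := by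
  intro l
  induction l with
  | nil => intro S L h; exact ⟨rfl, h⟩
  | cons p t ih =>
    intro S L h
    rw [List.foldl_cons, addNew_cons]
    dsimp only
    by_cases hp : p ∈ S
    · rw [if_pos hp, if_pos ((h p).mp hp)]
      exact ih S L h
    · rw [if_neg hp, if_neg (fun hl => hp ((h p).mpr hl))]
      apply ih
      intro q
      rw [PySem.Set.mem_add, h q]
      simp

theorem prefixes_run : ∀ (d : List (String × Int)) (S : PySem.Set (List Char)) (L : List (List Char)),
    (∀ q, q ∈ S ↔ q ∈ L) →
    ((d.foldl (fun s e => pvCollectWord s e.1.toList) (S, L)).2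
      = d.foldl (fun acc e => addNew acc (prefList e.1.toList)) L
    ∧ ∀ q, q ∈ (d.foldl (fun s e => pvCollectWord s e.1.toList) (S, L)).1
        ↔ q ∈ (d.foldl (fun s e => pvCollectWord s e.1.toList) (S, L)).2) := by
  intro d
  induction d with
  | nil => intro S L h; exact ⟨rfl, h⟩
  | cons e t ih =>
    intro S L h
    rw [List.foldl_cons, List.foldl_cons, collectWord_eq]
    obtain ⟨h2, hinv⟩ := collect_run (prefList e.1.toList) S L h
    rw [← h2]
    exact ih _ _ hinv

theorem prefixes_eq (d : List (String × Int)) :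
    (d.foldl (fun s e => pvCollectWord s e.1.toList)
        (([] : PySem.Set (List Char)), ([] : List (List Char)))).2 = pvPref d := by
  have h := (prefixes_run d [] [] (by simp)).1
  rw [h]
  rfl

-- ---- phase 2: the selection pass ----
theorem pre_forall {d : List (String × Int)} (h : Pre_predictive_text d) :
    ∀ e ∈ d, ∀ c ∈ e.1.toList, 'a' ≤ c ∧ c ≤ 'z' := by
  unfold Pre_predictive_text at h
  simp only [List.all_eq_true, Bool.and_eq_true, decide_eq_true_eq] at h
  intro e he c hc
  rw [Char.le_def, Char.le_def, UInt32.le_iff_toNat_le, UInt32.le_iff_toNat_le]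
  exact h e he c hc

theorem code_eq : ∀ {p : List Char}, (∀ c ∈ p, 'a' ≤ c ∧ c ≤ 'z') → mot_to_code p = pvCode p := by
  intro p
  induction p with
  | nil => intro _; rfl
  | cons c t ih =>
    intro h
    unfold mot_to_code pvCode at *
    rw [List.mapM_cons, List.mapM_cons]
    rw [show lettre_to_chiffre c = PySem.List.pyGet? pvT9 ((c.toNat : Int) - 97) from
      if_pos (h c (by simp))]
    rw [ih (fun c' hc' => h c' (by simp [hc']))]

theorem values_mem_pvPref_step (d : List (String × Int))
    (prop : PySem.Dict (List Char) (List Char)) (p : List Char)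
    (hp : p ∈ pvPref d) (hprop : ∀ v ∈ prop.values, v ∈ pvPref d) :
    ∀ v ∈ (pvBestStep d prop p).values, v ∈ pvPref d := by
  unfold pvBestStep
  cases pvCode p with
  | none => exact hprop
  | some code =>
    dsimp only
    split_ifs with h
    · intro v hv
      rcases PySem.Dict.mem_values_insert _ _ _ _ hv with h' | h'
      · exact h' ▸ hp
      · exact hprop v h'
    · exact hprop

theorem step_eq (d : List (String × Int)) (hpre : Pre_predictive_text d)
    (prop : PySem.Dict (List Char) (List Char)) (p : List Char)
    (hp : p ∈ pvPref d) (hprop : ∀ v ∈ prop.values, v ∈ pvPref d) :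
    pvPropStep (PySem.Dict.mk ((pvPref d).map (fun q => (q, pvWeight d q)))) prop p
    = pvBestStep d prop p := by
  have hchars : ∀ c ∈ p, 'a' ≤ c ∧ c ≤ 'z' := by
    rcases (mem_pvPref d).mp hp with ⟨e, he, _, hpre'⟩
    intro c hc
    exact pre_forall hpre e he c (hpre'.subset hc)
  unfold pvPropStep pvBestStep
  rw [code_eq hchars]
  cases hpc : pvCode p with
  | none => rfl
  | some code =>
    dsimp only
    have hfp : (PySem.Dict.mk ((pvPref d).map (fun q => (q, pvWeight d q)))).getD p 0
        = pvWeight d p := getD_mkmap (nodup_pvPref d) _ hp 0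
    by_cases hcon : prop.contains code = true
    · obtain ⟨v, hv⟩ : ∃ v, prop.get? code = some v := by
        apply Option.isSome_iff_exists.mp
        rw [← PySem.Dict.contains_eq_isSome_get?]
        exact hcon
      have hgd : prop.getD code [] = v := PySem.Dict.getD_of_get?_eq_some _ _ hv
      have hvmem : v ∈ pvPref d := by
        apply hprop
        have hitem : (code, v) ∈ prop.items := PySem.Dict.mem_items_of_get?_eq_some prop hv
        simp only [PySem.Dict.values, List.mem_map]
        exact ⟨(code, v), hitem, rfl⟩
      have hfv : (PySem.Dict.mk ((pvPref d).map (fun q => (q, pvWeight d q)))).getD v 0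
          = pvWeight d v := getD_mkmap (nodup_pvPref d) _ hvmem 0
      rw [hgd, hfv, hfp]
    · have hcf : prop.contains code = false := by simpa using hcon
      rw [if_pos (Or.inl hcf), if_pos (Or.inl hcf)]

theorem phase2 (d : List (String × Int)) (hpre : Pre_predictive_text d) :
    ∀ (l : List (List Char)), (∀ p ∈ l, p ∈ pvPref d) →
    ∀ (prop : PySem.Dict (List Char) (List Char)), (∀ v ∈ prop.values, v ∈ pvPref d) →
    l.foldl (pvPropStep (PySem.Dict.mk ((pvPref d).map (fun q => (q, pvWeight d q))))) prop
    = l.foldl (pvBestStep d) prop := by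
  intro l
  induction l with
  | nil => intro _ prop _; rfl
  | cons p t ih =>
    intro hl prop hprop
    have hp : p ∈ pvPref d := hl p (by simp)
    rw [List.foldl_cons, List.foldl_cons, step_eq d hpre prop p hp hprop]
    exact ih (fun q hq => hl q (by simp [hq])) _
      (values_mem_pvPref_step d prop p hp hprop)

-- ===== VERDICT (by name: the statement is the Claim_ definition above) =====
theorem predictive_text_spec : Claim_equal_predictive_text := by
  intro d _ hpre
  unfold Spec_predictive_text
  simp only [predictive_text, predictive_text_alt]
  rw [freq_spec, prefixes_eq, keys_mkmap]
  rw [phase2 d hpre (pvPref d) (fun _ h => h) PySem.Dict.empty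
    (by intro v hv; simp [PySem.Dict.values, PySem.Dict.empty] at hv)]
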